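-- pv_equiv track=rewrite | github.com/simjbaumgart/stockdrop | app/services/stock_service.py | _extract_transcript_summary
-- ===== SOURCE A (Python) =====
-- def _extract_transcript_summary(report_data: dict) -> str:
--     """
--     Extracts the 'Extended Transcript Summary' section from the News Agent's output.
--     Falls back to a short message if the summary can't be found.
--     """
--     news_report = report_data.get("macro_report", "")
--
--     marker = "Extended Transcript Summary"
--     if marker in news_report:
--         start = news_report.index(marker)
--         rest = news_report[start + len(marker):]
--         end_markers = ["## Key Drivers", "### Key Drivers", "## Narrative Check",
--                        "### Narrative Check", "## Top 5 Sources", "### Top 5 Sources",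
--                        "## MACRO CHECK", "NEEDS_ECONOMICS"]
--         end_pos = len(rest)
--         for em in end_markers:
--             if em in rest:
--                 pos = rest.index(em)
--                 end_pos = min(end_pos, pos)
--
--         summary = rest[:end_pos].strip()
--         if len(summary) > 100:
--             return summary
--
--     return "No transcript summary available from council."
-- ===== SOURCE B (Python) =====
-- def _extract_transcript_summary(report_data: dict) -> str:
--     """Single left-to-right position scan: the summary ends at the first
--     position where any end marker starts (instead of eight substring scans
--     with a running minimum)."""
--     news_report = report_data.get("macro_report", "")
--     marker = "Extended Transcript Summary"
--     pos = news_report.find(marker)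
--     if pos != -1:
--         rest = news_report[pos + len(marker):]
--         end_markers = ("## Key Drivers", "### Key Drivers", "## Narrative Check",
--                        "### Narrative Check", "## Top 5 Sources", "### Top 5 Sources",
--                        "## MACRO CHECK", "NEEDS_ECONOMICS")
--         end_pos = next((i for i in range(len(rest))
--                         if any(rest.startswith(em, i) for em in end_markers)),
--                        len(rest))
--         summary = rest[:end_pos].strip()
--         if len(summary) > 100:
--             return summary
--     return "No transcript summary available from council."
-- ===== Notes on version B (the rewrite author's own statement) =====
-- stated objective: alternative
-- what changed: A scans the tail once per end marker (eight substring searches) and keeps a running minimum of the match positions; B makes a single left-to-right scan over positions of the tail and stops at the first position where any end marker starts.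
import Mathlib
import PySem

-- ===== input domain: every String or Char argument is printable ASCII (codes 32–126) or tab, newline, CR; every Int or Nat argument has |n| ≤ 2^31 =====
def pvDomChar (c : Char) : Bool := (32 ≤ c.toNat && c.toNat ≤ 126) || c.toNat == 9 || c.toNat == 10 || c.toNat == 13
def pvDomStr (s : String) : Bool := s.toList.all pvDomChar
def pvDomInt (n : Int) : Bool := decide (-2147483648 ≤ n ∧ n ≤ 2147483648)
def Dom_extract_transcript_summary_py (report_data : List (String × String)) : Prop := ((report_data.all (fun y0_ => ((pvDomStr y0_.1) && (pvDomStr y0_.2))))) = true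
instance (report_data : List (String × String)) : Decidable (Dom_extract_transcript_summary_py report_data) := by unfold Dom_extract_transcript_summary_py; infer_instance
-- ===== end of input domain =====

-- B replaces A's eight substring scans with a running minimum by a single
-- left-to-right position scan stopping at the first position where any end
-- marker starts (objective: alternative; speed not claimed).

def pvEndMarkers : List String :=
  ["## Key Drivers", "### Key Drivers", "## Narrative Check",
   "### Narrative Check", "## Top 5 Sources", "### Top 5 Sources",
   "## MACRO CHECK", "NEEDS_ECONOMICS"]

-- ===== PORT A =====
def extract_transcript_summary_py (report_data : List (String × String)) : String :=
  let news_report := PySem.Dict.getD ⟨report_data⟩ "macro_report" ""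
  let marker := "Extended Transcript Summary"
  if PySem.Str.isIn marker news_report then
    let start := PySem.Str.find news_report marker      -- .index after the `in` check = find
    let rest := PySem.Str.slice news_report (some (start + PySem.Str.len marker)) none
    let end_pos := pvEndMarkers.foldl
      (fun ep em => if PySem.Str.isIn em rest then min ep (PySem.Str.find rest em) else ep)
      (PySem.Str.len rest)
    let summary := PySem.Str.strip (PySem.Str.slice rest none (some end_pos))
    if 100 < PySem.Str.len summary then summary
    else "No transcript summary available from council."
  else "No transcript summary available from council."

-- ===== PORT B =====
-- Source B's next(...) generator: the first i in range(len(rest)) at which some end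
-- marker starts, else len(rest); rest.startswith(em, i) with 0 ≤ i ≤ len(rest)
-- is exactly em <+: rest.drop i, i.e. PySem.Chars.startswith (rest.drop i) em.
def pvScanStop (r : List Char) (ms : List (List Char)) : Nat :=
  match (List.range r.length).find?
      (fun i => ms.any (fun m => PySem.Chars.startswith (r.drop i) m)) with
  | some i => i
  | none => r.length

def extract_transcript_summary_py_alt (report_data : List (String × String)) : String :=
  let news_report := PySem.Dict.getD ⟨report_data⟩ "macro_report" ""
  let marker := "Extended Transcript Summary"
  let pos := PySem.Str.find news_report marker
  if pos ≠ -1 then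
    let rest := PySem.Str.slice news_report (some (pos + PySem.Str.len marker)) none
    let end_pos := pvScanStop rest.toList (pvEndMarkers.map String.toList)
    let summary := PySem.Str.strip (PySem.Str.slice rest none (some (end_pos : Int)))
    if 100 < PySem.Str.len summary then summary
    else "No transcript summary available from council."
  else "No transcript summary available from council."

-- ===== PRECONDITION & SPEC =====
def Spec_extract_transcript_summary_py (report_data : List (String × String)) (out : String) : Prop := out = extract_transcript_summary_py_alt report_data
instance (report_data : List (String × String)) (out : String) : Decidable (Spec_extract_transcript_summary_py report_data out) := by unfold Spec_extract_transcript_summary_py; infer_instance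

-- ===== CLAIM (what is proved, stated in full; the proofs are below) =====
def Claim_equal_extract_transcript_summary_py : Prop := ∀ (report_data : List (String × String)), Dom_extract_transcript_summary_py report_data → Spec_extract_transcript_summary_py report_data (extract_transcript_summary_py report_data)

-- ===== LEMMAS AND PROOFS =====

-- A's loop step, at the List Char level
def pvStep (r : List Char) : Int → List Char → Int :=
  fun ep m => if PySem.Chars.isIn m r then min ep (PySem.Chars.find r m) else ep

-- invariant of A's running-minimum loop: the accumulator stays in [0, ep],
-- no processed marker starts strictly before it, and if it dropped below the
-- start value then some processed marker starts exactly there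
lemma pvStepInv (r : List Char) (ms : List (List Char)) : ∀ (ep : Int), 0 ≤ ep → ep ≤ (r.length : Int) →
    0 ≤ ms.foldl (pvStep r) ep ∧ ms.foldl (pvStep r) ep ≤ ep ∧
    (∀ m ∈ ms, ∀ i : Nat, (i : Int) < ms.foldl (pvStep r) ep → ¬ m <+: r.drop i) ∧
    (ms.foldl (pvStep r) ep < ep → ∃ m ∈ ms, m <+: r.drop (ms.foldl (pvStep r) ep).toNat) := by
  induction ms with
  | nil =>
    intro ep h0 hl
    simp only [List.foldl_nil]
    exact ⟨h0, le_refl _, by simp, by omega⟩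
  | cons m ms ih =>
    intro ep h0 hl
    by_cases hin : PySem.Chars.isIn m r = true
    · have hfnn : 0 ≤ PySem.Chars.find r m := by
        rw [PySem.Chars.find_nonneg_iff]; exact (PySem.Chars.isIn_iff_infix m r).mp hin
      have hfle := PySem.Chars.find_le_length r m
      have hstep : List.foldl (pvStep r) ep (m :: ms) =
          List.foldl (pvStep r) (min ep (PySem.Chars.find r m)) ms := by
        simp [pvStep, hin]
      have h0' : 0 ≤ min ep (PySem.Chars.find r m) := le_min h0 hfnn
      have hl' : min ep (PySem.Chars.find r m) ≤ (r.length : Int) :=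
        le_trans (min_le_right _ _) hfle
      obtain ⟨i0, i1, i2, i3⟩ := ih (min ep (PySem.Chars.find r m)) h0' hl'
      rw [hstep]
      refine ⟨i0, le_trans i1 (min_le_left _ _), ?_, ?_⟩
      · intro m' hm i hi
        rcases List.mem_cons.mp hm with h | h
        · rw [h]
          have hfs := (PySem.Chars.find_spec hfnn).2
          apply hfs
          have : (i : Int) < PySem.Chars.find r m :=
            lt_of_lt_of_le hi (le_trans i1 (min_le_right _ _))
          omega
        · exact i2 m' h i hi
      · intro hlt
        rcases lt_or_eq_of_le i1 with h | h
        · obtain ⟨m', hm, hp⟩ := i3 h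
          exact ⟨m', List.mem_cons_of_mem _ hm, hp⟩
        · rw [h] at hlt ⊢
          have hmin : min ep (PySem.Chars.find r m) = PySem.Chars.find r m := by
            rcases min_cases ep (PySem.Chars.find r m) with ⟨h1, h2⟩ | ⟨h1, h2⟩ <;> omega
          rw [hmin]
          exact ⟨m, List.mem_cons_self, (PySem.Chars.find_spec hfnn).1⟩
    · have hstep : List.foldl (pvStep r) ep (m :: ms) = List.foldl (pvStep r) ep ms := by
        simp [pvStep, hin]
      obtain ⟨i0, i1, i2, i3⟩ := ih ep h0 hl
      rw [hstep]
      refine ⟨i0, i1, ?_, ?_⟩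
      · intro m' hm i hi
        rcases List.mem_cons.mp hm with h | h
        · rw [h]
          intro hp
          have : PySem.Chars.isIn m r = true :=
            (PySem.Chars.exists_prefix_drop_iff_isIn m r).mp ⟨i, hp⟩
          exact hin this
        · exact i2 m' h i hi
      · intro hlt
        obtain ⟨m', hm, hp⟩ := i3 hlt
        exact ⟨m', List.mem_cons_of_mem _ hm, hp⟩

-- find? over range returns the least index satisfying the predicate
lemma pvFindRangeSome (n N : Nat) (p : Nat → Bool) (hN : N < n) (hp : p N = true)
    (hlt : ∀ i < N, p i = false) : (List.range n).find? p = some N := by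
  have hsplit : n = N + (n - N - 1 + 1) := by omega
  rw [hsplit, List.range_add, List.find?_append]
  have h1 : (List.range N).find? p = none := by
    rw [List.find?_eq_none]
    intro i hi
    simp only [List.mem_range] at hi
    simp [hlt i hi]
  rw [h1, Option.none_or, List.range_succ_eq_map, List.map_cons]
  simp [hp]

-- the two end positions coincide
lemma pvStopEq (r : List Char) (ms : List (List Char)) :
    ms.foldl (pvStep r) (r.length : Int) = (pvScanStop r ms : Int) := by
  obtain ⟨h0, h1, h2, h3⟩ := pvStepInv r ms (r.length : Int) (by positivity) le_rfl
  set M := ms.foldl (pvStep r) (r.length : Int) with hM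
  rcases lt_or_eq_of_le h1 with hlt | heq
  · obtain ⟨m, hm, hp⟩ := h3 hlt
    have hN : M.toNat < r.length := by omega
    have hpN : (fun i => ms.any (fun m => PySem.Chars.startswith (r.drop i) m)) M.toNat = true := by
      simp only [List.any_eq_true]
      exact ⟨m, hm, (PySem.Chars.startswith_iff _ _).mpr hp⟩
    have hbelow : ∀ i < M.toNat, (fun i => ms.any (fun m => PySem.Chars.startswith (r.drop i) m)) i = false := by
      intro i hi
      rw [← Bool.not_eq_true]
      simp only [List.any_eq_true, not_exists]
      rintro m' ⟨hm', hs⟩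
      exact h2 m' hm' i (by omega) ((PySem.Chars.startswith_iff _ _).mp hs)
    unfold pvScanStop
    rw [pvFindRangeSome r.length M.toNat _ hN hpN hbelow]
    show M = (M.toNat : Int)
    omega
  · have hall : ∀ i < r.length, (fun i => ms.any (fun m => PySem.Chars.startswith (r.drop i) m)) i = false := by
      intro i hi
      rw [← Bool.not_eq_true]
      simp only [List.any_eq_true, not_exists]
      rintro m' ⟨hm', hs⟩
      exact h2 m' hm' i (by omega) ((PySem.Chars.startswith_iff _ _).mp hs)
    unfold pvScanStop
    have : (List.range r.length).find? (fun i => ms.any (fun m => PySem.Chars.startswith (r.drop i) m)) = none := by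
      rw [List.find?_eq_none]
      intro i hi
      simp only [List.mem_range] at hi
      simp [hall i hi]
    rw [this]
    show M = (r.length : Int)
    omega

-- the same, stated over the Str-level fold port A performs
lemma pvStopEqStr (rest : String) :
    pvEndMarkers.foldl
        (fun ep em => if PySem.Str.isIn em rest then min ep (PySem.Str.find rest em) else ep)
        (PySem.Str.len rest)
      = (pvScanStop rest.toList (pvEndMarkers.map String.toList) : Int) := by
  rw [← pvStopEq, List.foldl_map]
  simp [pvStep, PySem.Str.isIn, PySem.Str.find, PySem.Str.len_eq]

-- ===== VERDICT (by name: the statement is the Claim_ definition above) =====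
theorem extract_transcript_summary_py_spec : Claim_equal_extract_transcript_summary_py := by
  intro rd _
  unfold Spec_extract_transcript_summary_py
  unfold extract_transcript_summary_py extract_transcript_summary_py_alt
  set nr := PySem.Dict.getD (⟨rd⟩ : PySem.Dict String String) "macro_report" "" with hnr
  by_cases h : PySem.Str.isIn "Extended Transcript Summary" nr = true
  · have hb : ¬ PySem.Str.find nr "Extended Transcript Summary" = -1 :=
      (PySem.Str.find_ne_neg_one_iff nr "Extended Transcript Summary").mpr
        ((PySem.Str.isIn_iff_infix _ _).mp h)
    simp only [h, if_true, hb, not_false_iff, ne_eq]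
    rw [pvStopEqStr]
  · have h' : PySem.Str.isIn "Extended Transcript Summary" nr = false := by
      simpa using h
    have hb2 : PySem.Str.find nr "Extended Transcript Summary" = -1 := by
      by_contra hc
      exact h ((PySem.Str.isIn_iff_infix _ _).mpr
        ((PySem.Str.find_ne_neg_one_iff nr "Extended Transcript Summary").mp hc))
    simp only [h', Bool.false_eq_true, if_false, hb2, ne_eq, not_true_eq_false]
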